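-- pv_equiv track=rewrite | github.com/zhengkaitu/BTTR | bttr/datamodule/pixel_utils.py | _get_n_slots
-- ===== SOURCE A (Python) =====
-- def _get_n_slots(_labels, n_clusters):
--     n_slots = 0
--     if _labels[0] % 2 == 1:
--         n_slots += 1
--     for j in range(1, len(_labels)):
--         if (_labels[j] - _labels[j-1]) % 2 == 0:
--             n_slots += 1
--     if (n_clusters - _labels[-1]) % 2 == 0:
--         n_slots += 1
--     return n_slots
-- ===== SOURCE B (Python) =====
-- def _get_n_slots(_labels, n_clusters):
--     bits = [1] + [x % 2 for x in _labels] + [n_clusters % 2]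
--     runs = []
--     for b in bits:
--         if not runs or runs[-1][0] != b:
--             runs.append([b, 1])
--         else:
--             runs[-1][1] += 1
--     return len(bits) - len(runs)
-- ===== Notes on version B (the rewrite author's own statement) =====
-- stated objective: alternative
-- what changed: B maps the sentinel-augmented sequence [1]+labels+[n_clusters] to parity bits, builds its run-length encoding in one pass, and returns length minus number of runs (each slot boundary merges two bits into one run), instead of A's three separate parity-match counts over indices.
import Mathlib
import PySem

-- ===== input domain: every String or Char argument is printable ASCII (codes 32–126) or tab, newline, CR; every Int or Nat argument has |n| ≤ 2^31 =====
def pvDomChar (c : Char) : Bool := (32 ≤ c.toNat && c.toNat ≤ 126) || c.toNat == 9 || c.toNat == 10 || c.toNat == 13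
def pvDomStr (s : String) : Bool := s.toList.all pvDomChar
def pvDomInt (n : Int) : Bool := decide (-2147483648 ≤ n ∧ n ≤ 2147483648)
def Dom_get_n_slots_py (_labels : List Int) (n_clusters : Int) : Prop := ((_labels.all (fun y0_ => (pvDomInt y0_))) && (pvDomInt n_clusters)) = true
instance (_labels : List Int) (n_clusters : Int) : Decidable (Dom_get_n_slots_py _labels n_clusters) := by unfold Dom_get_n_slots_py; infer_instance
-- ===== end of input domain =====

-- B maps the sentinel-augmented sequence to parity bits, builds its run-length encoding and
-- returns length minus number of runs, instead of A's three separate parity-match counts;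
-- equivalence of RETURN values is proved on nonempty _labels.

-- ===== PORT A =====
def get_n_slots_py (_labels : List Int) (n_clusters : Int) : Int :=
  let n_slots : Int := 0
  let n_slots := if PySem.Int.mod ((PySem.List.pyGet? _labels 0).getD 0) 2 = 1 then n_slots + 1 else n_slots
  let n_slots := (PySem.List.pyRange 1 (_labels.length : Int) 1).foldl
    (fun acc j =>
      if PySem.Int.mod (PySem.List.pyGetD _labels j 0 - PySem.List.pyGetD _labels (j - 1) 0) 2 = 0
      then acc + 1 else acc) n_slots
  if PySem.Int.mod (n_clusters - (PySem.List.pyGet? _labels (-1)).getD 0) 2 = 0 then n_slots + 1 else n_slots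

-- ===== PORT B =====
-- one loop step of Source B: extend the last run or start a new one (runs[-1] access / append)
def pvStepRun (runs : List (Int × Int)) (b : Int) : List (Int × Int) :=
  match runs.getLast? with
  | none => runs ++ [(b, 1)]
  | some (p, c) => if p ≠ b then runs ++ [(b, 1)] else runs.dropLast ++ [(p, c + 1)]

def get_n_slots_py_alt (_labels : List Int) (n_clusters : Int) : Int :=
  let bits : List Int := 1 :: (_labels.map (fun x => PySem.Int.mod x 2) ++ [PySem.Int.mod n_clusters 2])
  let runs := bits.foldl pvStepRun []
  (bits.length : Int) - (runs.length : Int)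

-- ===== PRECONDITION & SPEC =====
-- A indexes _labels[0] and _labels[-1], so it raises IndexError on an empty list; Pre_ excludes exactly that.
def Pre_get_n_slots_py (_labels : List Int) (n_clusters : Int) : Prop := _labels ≠ []
instance (_labels : List Int) (n_clusters : Int) : Decidable (Pre_get_n_slots_py _labels n_clusters) := by unfold Pre_get_n_slots_py; infer_instance
def pvWitness_get_n_slots_py : List Int × Int := ([2, 3], 5)

def Spec_get_n_slots_py (_labels : List Int) (n_clusters : Int) (out : Int) : Prop := out = get_n_slots_py_alt _labels n_clusters
instance (_labels : List Int) (n_clusters : Int) (out : Int) : Decidable (Spec_get_n_slots_py _labels n_clusters out) := by unfold Spec_get_n_slots_py; infer_instance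

-- ===== CLAIM (what is proved, stated in full; the proofs are below) =====
def Claim_equal_get_n_slots_py : Prop := ∀ (_labels : List Int) (n_clusters : Int), Dom_get_n_slots_py _labels n_clusters → Pre_get_n_slots_py _labels n_clusters → Spec_get_n_slots_py _labels n_clusters (get_n_slots_py _labels n_clusters)

-- ===== LEMMAS AND PROOFS =====

/-- Sum of `h` over adjacent pairs of a list. -/
def adjSum (h : Int → Int → Int) : List Int → Int
  | [] => 0
  | [_] => 0
  | a :: b :: t => h a b + adjSum h (b :: t)

lemma foldl_range_adj (h : Int → Int → Int) :
    ∀ (l : List Int) (c : Int),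
      (List.range (l.length - 1)).foldl
        (fun acc k => acc + h (l.getD k 0) (l.getD (k + 1) 0)) c
      = c + adjSum h l := by
  intro l
  induction l with
  | nil => intro c; simp [adjSum]
  | cons a t ih =>
    intro c
    cases t with
    | nil => simp [adjSum]
    | cons b t' =>
      have hlen : (a :: b :: t').length - 1 = ((b :: t').length - 1) + 1 := by
        simp
      rw [hlen, List.range_succ_eq_map, List.foldl_cons, List.foldl_map]
      simp only [Nat.succ_eq_add_one, List.getD_cons_zero, List.getD_cons_succ]
      simp only [List.getD_cons_succ] at ih
      rw [ih (c + h a b)]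
      simp [adjSum]; ring

/-- An indexed fold over `range(1, len(l))` of a contribution of `(l[j-1], l[j])` is `adjSum`. -/
lemma fold_pyRange_adj (h : Int → Int → Int) (l : List Int) (c : Int) :
    (PySem.List.pyRange 1 (l.length : Int) 1).foldl
      (fun acc j => acc + h (PySem.List.pyGetD l (j - 1) 0) (PySem.List.pyGetD l j 0)) c
    = c + adjSum h l := by
  rw [PySem.List.pyRange_one, List.foldl_map]
  have hfun : (fun (acc : Int) (k : Nat) =>
      acc + h (PySem.List.pyGetD l ((1 : Int) + (k : Int) - 1) 0) (PySem.List.pyGetD l ((1 : Int) + (k : Int)) 0))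
      = fun acc k => acc + h (l.getD k 0) (l.getD (k + 1) 0) := by
    funext acc k
    have h1 : (1 : Int) + (k : Int) - 1 = (k : Int) := by ring
    have h2 : (1 : Int) + (k : Int) = ((k + 1 : Nat) : Int) := by push_cast; ring
    rw [h1, h2, PySem.List.pyGetD_natCast, PySem.List.pyGetD_natCast]
  have hn : ((l.length : Int) - 1).toNat = l.length - 1 := by omega
  rw [hfun, hn, foldl_range_adj]

lemma parity_iff (a b : Int) :
    (PySem.Int.mod (b - a) 2 = 0) ↔ (PySem.Int.mod a 2 = PySem.Int.mod b 2) := by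
  have h1 : PySem.Int.mod (b - a) 2 = (b - a) % 2 := PySem.Int.mod_eq_emod_of_pos (by norm_num)
  have h2 : PySem.Int.mod a 2 = a % 2 := PySem.Int.mod_eq_emod_of_pos (by norm_num)
  have h3 : PySem.Int.mod b 2 = b % 2 := PySem.Int.mod_eq_emod_of_pos (by norm_num)
  rw [h1, h2, h3]; omega

lemma adjSum_append_last (h : Int → Int → Int) :
    ∀ (a : Int) (t : List Int) (z : Int),
      adjSum h (a :: t ++ [z]) = adjSum h (a :: t) + h ((a :: t).getLast (by simp)) z := by
  intro a t
  induction t generalizing a with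
  | nil => intro z; simp [adjSum]
  | cons b t' ih =>
    intro z
    have := ih b z
    simp only [List.cons_append, adjSum] at *
    rw [this]
    have : (a :: b :: t').getLast (by simp) = (b :: t').getLast (by simp) := by
      simp [List.getLast_cons]
    rw [this]; ring

/-- Number of new runs started by `l` after a last parity `p`. -/
def newRuns (p : Int) : List Int → Nat
  | [] => 0
  | b :: t => (if p = b then 0 else 1) + newRuns b t

/-- Count of adjacent equal pairs in `p :: l`. -/
def eqAdj (p : Int) : List Int → Int
  | [] => 0
  | b :: t => (if p = b then 1 else 0) + eqAdj b t

lemma newRuns_le (p : Int) : ∀ l : List Int, newRuns p l ≤ l.length := by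
  intro l
  induction l generalizing p with
  | nil => simp [newRuns]
  | cons b t ih =>
    simp only [newRuns, List.length_cons]
    have := ih b
    split <;> omega

lemma eqAdj_eq (p : Int) : ∀ l : List Int, eqAdj p l = (l.length : Int) - (newRuns p l : Int) := by
  intro l
  induction l generalizing p with
  | nil => simp [eqAdj, newRuns]
  | cons b t ih =>
    have hle := newRuns_le b t
    simp only [eqAdj, newRuns, ih b, List.length_cons]
    split <;> push_cast <;> omega

lemma foldRuns_len : ∀ (l : List Int) (rs : List (Int × Int)) (p c : Int),
    (l.foldl pvStepRun (rs ++ [(p, c)])).length = rs.length + 1 + newRuns p l := by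
  intro l
  induction l with
  | nil => intro rs p c; simp [newRuns]
  | cons b t ih =>
    intro rs p c
    simp only [List.foldl_cons, newRuns]
    have hlast : (rs ++ [(p, c)]).getLast? = some (p, c) := by
      simp [List.getLast?_append]
    by_cases hpb : p = b
    · have : pvStepRun (rs ++ [(p, c)]) b = rs ++ [(p, c + 1)] := by
        simp [pvStepRun, hpb]
      rw [this, ih rs p (c + 1)]
      simp [hpb]
    · have : pvStepRun (rs ++ [(p, c)]) b = (rs ++ [(p, c)]) ++ [(b, 1)] := by
        simp [pvStepRun, hlast, hpb]
      rw [this, ih (rs ++ [(p, c)]) b 1]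
      simp [hpb]; omega

lemma eqAdj_map (f : Int → Int) : ∀ (x : Int) (l : List Int),
    eqAdj (f x) (l.map f) = adjSum (fun a b => if f a = f b then 1 else 0) (x :: l) := by
  intro x l
  induction l generalizing x with
  | nil => simp [eqAdj, adjSum]
  | cons b t ih => simp only [List.map_cons, eqAdj, adjSum, ih b]

/-- B's port reduced to `adjSum` of parity matches over the sentinel-augmented list. -/
lemma alt_eq_adjSum (l : List Int) (nc : Int) :
    get_n_slots_py_alt l nc
      = adjSum (fun a b => if PySem.Int.mod a 2 = PySem.Int.mod b 2 then 1 else 0) (1 :: (l ++ [nc])) := by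
  unfold get_n_slots_py_alt
  have hmap : l.map (fun x => PySem.Int.mod x 2) ++ [PySem.Int.mod nc 2]
      = (l ++ [nc]).map (fun x => PySem.Int.mod x 2) := by simp
  have hstep : pvStepRun [] 1 = [(1, 1)] := by simp [pvStepRun]
  simp only [hmap, List.foldl_cons, hstep]
  have h1 : [((1 : Int), (1 : Int))] = ([] : List (Int × Int)) ++ [(1, 1)] := rfl
  rw [h1, foldRuns_len ((l ++ [nc]).map (fun x => PySem.Int.mod x 2)) [] 1 1]
  have hf1 : PySem.Int.mod 1 2 = (1 : Int) := by decide
  have h2 := eqAdj_map (fun x => PySem.Int.mod x 2) 1 (l ++ [nc])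
  simp only [hf1] at h2
  rw [← h2, eqAdj_eq]
  simp; ring

-- ===== VERDICT (by name: the statement is the Claim_ definition above) =====
theorem get_n_slots_py_spec : Claim_equal_get_n_slots_py := by
  intro labels nc _ hpre
  unfold Spec_get_n_slots_py
  rw [alt_eq_adjSum]
  unfold get_n_slots_py
  obtain ⟨a, t, rfl⟩ : ∃ a t, labels = a :: t := by
    cases labels with
    | nil => exact absurd rfl hpre
    | cons a t => exact ⟨a, t, rfl⟩
  set hB : Int → Int → Int := fun x y => if PySem.Int.mod x 2 = PySem.Int.mod y 2 then 1 else 0 with hBdef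
  set hA : Int → Int → Int := fun x y => if PySem.Int.mod (y - x) 2 = 0 then 1 else 0 with hAdef
  have hfunA : (fun (acc j : Int) =>
      if PySem.Int.mod (PySem.List.pyGetD (a :: t) j 0 - PySem.List.pyGetD (a :: t) (j - 1) 0) 2 = 0
      then acc + 1 else acc)
      = fun acc j => acc + hA (PySem.List.pyGetD (a :: t) (j - 1) 0) (PySem.List.pyGetD (a :: t) j 0) := by
    funext acc j; simp only [hAdef]; split <;> simp_all
  have hAB : hA = hB := by
    funext x y; simp only [hAdef, hBdef, parity_iff]
  simp only [hfunA, hAB]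
  rw [fold_pyRange_adj hB]
  have hseq : adjSum hB (1 :: ((a :: t) ++ [nc]))
      = hB 1 a + (adjSum hB (a :: t) + hB ((a :: t).getLast (by simp)) nc) := by
    cases t with
    | nil => simp [adjSum]
    | cons b t' =>
      have h1 : adjSum hB (1 :: ((a :: b :: t') ++ [nc]))
          = hB 1 a + adjSum hB ((a :: b :: t') ++ [nc]) := by
        simp [adjSum]
      rw [h1, adjSum_append_last hB a (b :: t') nc]
  rw [hseq]
  have hfirst : (if PySem.Int.mod ((PySem.List.pyGet? (a :: t) 0).getD 0) 2 = 1 then (0:Int) + 1 else 0)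
      = hB 1 a := by
    rw [PySem.List.pyGet?_zero_cons]
    have hm1 : PySem.Int.mod 1 2 = 1 := by decide
    have hma : PySem.Int.mod a 2 = a % 2 := PySem.Int.mod_eq_emod_of_pos (by norm_num)
    simp only [hBdef, Option.getD_some, hm1, hma]
    split <;> split <;> omega
  have hlast : (PySem.List.pyGet? (a :: t) (-1)).getD 0 = (a :: t).getLast (by simp) := by
    rw [PySem.List.pyGet?_neg_one, List.getLast?_eq_some_getLast (l := a :: t) (by simp)]
    simp
  rw [hfirst, hlast]
  have hend : hB ((a :: t).getLast (by simp)) nc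
      = (if PySem.Int.mod (nc - (a :: t).getLast (by simp)) 2 = 0 then (1:Int) else 0) := by
    have hiff := parity_iff ((a :: t).getLast (by simp)) nc
    simp only [hBdef]
    by_cases hc : PySem.Int.mod (nc - (a :: t).getLast (by simp)) 2 = 0
    · rw [if_pos hc, if_pos (hiff.mp hc)]
    · rw [if_neg hc, if_neg (fun h => hc (hiff.mpr h))]
  rw [hend]
  split <;> ring
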